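-- pv_equiv track=rewrite | github.com/insight-capital/ai-expert-system | tools/registry_utils.py | extract_tags_auto
-- ===== SOURCE A (Python) =====
-- def extract_tags_auto(name: str, domain_scope: list[str]) -> list[str]:
--     """Auto-generate suggested tags from name and domain scope."""
--     tags = set()
--
--     name_lower = name.lower()
--     if 'strategy' in name_lower or 'strategist' in name_lower:
--         tags.add('strategy')
--     if 'engineer' in name_lower:
--         tags.add('engineering')
--     if 'architect' in name_lower:
--         tags.add('architecture')
--     if 'lead' in name_lower or 'director' in name_lower:
--         tags.add('leadership')
--     if 'research' in name_lower:
--         tags.add('research')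
--     if 'content' in name_lower or 'writer' in name_lower or 'editor' in name_lower:
--         tags.add('content')
--     if 'security' in name_lower or 'risk' in name_lower:
--         tags.add('security')
--     if 'data' in name_lower:
--         tags.add('data')
--     if any(term in name_lower for term in ['ai', 'ml', 'llm']):
--         tags.add('ai')
--     if any(term in name_lower for term in ['legal', 'compliance', 'regulatory']):
--         tags.add('legal')
--     if any(term in name_lower for term in ['finance', 'valuation', 'investment']):
--         tags.add('finance')
--     if any(term in name_lower for term in ['m&a', 'merger', 'acquisition', 'deal']):
--         tags.add('m&a')
--
--     for item in domain_scope[:3]: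
--         item_lower = item.lower()
--         if 'prompt' in item_lower:
--             tags.add('prompt-engineering')
--         if 'agent' in item_lower:
--             tags.add('agent-architecture')
--         if 'pipeline' in item_lower:
--             tags.add('pipeline')
--
--     return sorted(tags)
-- ===== SOURCE B (Python) =====
-- # Candidate tags are enumerated in their final (alphabetical) order and each is
-- # tested against the relevant lowered text(s), so no set and no sort is needed.
-- _RULES = [  # (tag, keywords, search the domain items instead of the name?)
--     ('agent-architecture', ('agent',), True),
--     ('ai', ('ai', 'ml', 'llm'), False),
--     ('architecture', ('architect',), False),
--     ('content', ('content', 'writer', 'editor'), False),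
--     ('data', ('data',), False),
--     ('engineering', ('engineer',), False),
--     ('finance', ('finance', 'valuation', 'investment'), False),
--     ('leadership', ('lead', 'director'), False),
--     ('legal', ('legal', 'compliance', 'regulatory'), False),
--     ('m&a', ('m&a', 'merger', 'acquisition', 'deal'), False),
--     ('pipeline', ('pipeline',), True),
--     ('prompt-engineering', ('prompt',), True),
--     ('research', ('research',), False),
--     ('security', ('security', 'risk'), False),
--     ('strategy', ('strategy', 'strategist'), False),
-- ]
--
--
-- def extract_tags_auto(name: str, domain_scope: list[str]) -> list[str]:
--     """Auto-generate suggested tags: filter the pre-sorted tag universe."""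
--     texts = {False: [name.lower()], True: [it.lower() for it in domain_scope[:3]]}
--     return [tag for tag, kws, dom in _RULES
--             if any(k in t for t in texts[dom] for k in kws)]
-- ===== Notes on version B (the rewrite author's own statement) =====
-- stated objective: simpler
-- what changed: Instead of collecting matched tags into a set and sorting it, B enumerates the fixed tag universe already in alphabetical (output) order and filters it with one membership test per candidate tag, so the set, the dedup and the final sort disappear; the output is built directly in order by a single comprehension.
import Mathlib
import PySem

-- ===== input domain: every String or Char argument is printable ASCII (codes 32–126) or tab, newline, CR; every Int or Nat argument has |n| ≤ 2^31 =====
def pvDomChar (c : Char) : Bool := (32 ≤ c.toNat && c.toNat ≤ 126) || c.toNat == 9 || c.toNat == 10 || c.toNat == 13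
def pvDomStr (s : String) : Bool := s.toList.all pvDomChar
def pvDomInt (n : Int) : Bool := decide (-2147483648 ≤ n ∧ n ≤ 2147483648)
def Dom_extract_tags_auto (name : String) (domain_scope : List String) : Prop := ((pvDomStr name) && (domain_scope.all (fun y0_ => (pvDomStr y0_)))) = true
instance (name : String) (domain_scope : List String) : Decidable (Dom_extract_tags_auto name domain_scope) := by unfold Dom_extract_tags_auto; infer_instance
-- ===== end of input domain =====

-- B replaces A's build-a-set-then-sort by filtering the alphabetically pre-sorted tag universe; objective: simpler.

-- ===== PORT A =====
def extract_tags_auto (name : String) (domain_scope : List String) : List String :=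
  let tags : PySem.Set String := PySem.Set.empty
  let nl := PySem.Str.lower name
  let tags := if PySem.Str.isIn "strategy" nl || PySem.Str.isIn "strategist" nl then PySem.Set.add tags "strategy" else tags
  let tags := if PySem.Str.isIn "engineer" nl then PySem.Set.add tags "engineering" else tags
  let tags := if PySem.Str.isIn "architect" nl then PySem.Set.add tags "architecture" else tags
  let tags := if PySem.Str.isIn "lead" nl || PySem.Str.isIn "director" nl then PySem.Set.add tags "leadership" else tags
  let tags := if PySem.Str.isIn "research" nl then PySem.Set.add tags "research" else tags
  let tags := if PySem.Str.isIn "content" nl || PySem.Str.isIn "writer" nl || PySem.Str.isIn "editor" nl then PySem.Set.add tags "content" else tags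
  let tags := if PySem.Str.isIn "security" nl || PySem.Str.isIn "risk" nl then PySem.Set.add tags "security" else tags
  let tags := if PySem.Str.isIn "data" nl then PySem.Set.add tags "data" else tags
  let tags := if (["ai", "ml", "llm"] : List String).any (fun term => PySem.Str.isIn term nl) then PySem.Set.add tags "ai" else tags
  let tags := if (["legal", "compliance", "regulatory"] : List String).any (fun term => PySem.Str.isIn term nl) then PySem.Set.add tags "legal" else tags
  let tags := if (["finance", "valuation", "investment"] : List String).any (fun term => PySem.Str.isIn term nl) then PySem.Set.add tags "finance" else tags
  let tags := if (["m&a", "merger", "acquisition", "deal"] : List String).any (fun term => PySem.Str.isIn term nl) then PySem.Set.add tags "m&a" else tags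
  let tags := (PySem.List.slice domain_scope none (some 3)).foldl (fun tags item =>
    let il := PySem.Str.lower item
    let tags := if PySem.Str.isIn "prompt" il then PySem.Set.add tags "prompt-engineering" else tags
    let tags := if PySem.Str.isIn "agent" il then PySem.Set.add tags "agent-architecture" else tags
    let tags := if PySem.Str.isIn "pipeline" il then PySem.Set.add tags "pipeline" else tags
    tags) tags
  PySem.List.sorted tags (fun x => x) false

-- ===== PORT B =====
-- rule table: (tag, keywords, search the domain items instead of the name?), in alphabetical tag order
def pvRules : List (String × List String × Bool) :=
  [("agent-architecture", ["agent"], true),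
   ("ai", ["ai", "ml", "llm"], false),
   ("architecture", ["architect"], false),
   ("content", ["content", "writer", "editor"], false),
   ("data", ["data"], false),
   ("engineering", ["engineer"], false),
   ("finance", ["finance", "valuation", "investment"], false),
   ("leadership", ["lead", "director"], false),
   ("legal", ["legal", "compliance", "regulatory"], false),
   ("m&a", ["m&a", "merger", "acquisition", "deal"], false),
   ("pipeline", ["pipeline"], true),
   ("prompt-engineering", ["prompt"], true),
   ("research", ["research"], false),
   ("security", ["security", "risk"], false),
   ("strategy", ["strategy", "strategist"], false)]

def extract_tags_auto_alt (name : String) (domain_scope : List String) : List String :=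
  let nameTexts := [PySem.Str.lower name]
  let domTexts := (PySem.List.slice domain_scope none (some 3)).map PySem.Str.lower
  pvRules.filterMap (fun r =>
    if (if r.2.2 then domTexts else nameTexts).any (fun t => r.2.1.any (fun k => PySem.Str.isIn k t))
    then some r.1 else none)

-- ===== PRECONDITION & SPEC =====
def Spec_extract_tags_auto (name : String) (domain_scope : List String) (out : List String) : Prop := out = extract_tags_auto_alt name domain_scope
instance (name : String) (domain_scope : List String) (out : List String) : Decidable (Spec_extract_tags_auto name domain_scope out) := by unfold Spec_extract_tags_auto; infer_instance

-- ===== CLAIM (what is proved, stated in full; the proofs are below) =====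
def Claim_equal_extract_tags_auto : Prop := ∀ (name : String) (domain_scope : List String), Dom_extract_tags_auto name domain_scope → Spec_extract_tags_auto name domain_scope (extract_tags_auto name domain_scope)

-- ===== LEMMAS AND PROOFS =====

theorem mem_ite_add {c : Prop} [Decidable c] (s : List String) (t x : String) :
    x ∈ (if c then PySem.Set.add s t else s) ↔ x ∈ s ∨ (c ∧ t = x) := by
  split_ifs with h <;> simp [PySem.Set.mem_add, h, eq_comm]

theorem nodup_ite_add {c : Prop} [Decidable c] {s : List String} (t : String) (h : s.Nodup) :
    (if c then PySem.Set.add s t else s).Nodup := by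
  split_ifs
  · exact PySem.Set.nodup_add _ _ h
  · exact h

-- A's chain of conditional set-inserts, abstracted as a fold over (tag, hit) pairs
def condAdds (rules : List (String × Bool)) (s : PySem.Set String) : PySem.Set String :=
  rules.foldl (fun s r => if r.2 then PySem.Set.add s r.1 else s) s

theorem mem_condAdds (rules : List (String × Bool)) (s : PySem.Set String) (x : String) :
    x ∈ condAdds rules s ↔ x ∈ s ∨ ∃ r ∈ rules, r.2 = true ∧ r.1 = x := by
  induction rules generalizing s with
  | nil => simp [condAdds]
  | cons a l ih =>
    simp only [condAdds, List.foldl_cons] at *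
    simp only [ih, mem_ite_add, List.mem_cons, exists_eq_or_imp]
    tauto

theorem nodup_condAdds (rules : List (String × Bool)) (s : PySem.Set String) (hs : s.Nodup) :
    (condAdds rules s).Nodup := by
  induction rules generalizing s with
  | nil => exact hs
  | cons a l ih => exact ih _ (nodup_ite_add _ hs)

-- the name-phase pairs A's twelve ifs produce
def aNameRules (name : String) : List (String × Bool) :=
  let nl := PySem.Str.lower name
  [("strategy", PySem.Str.isIn "strategy" nl || PySem.Str.isIn "strategist" nl),
   ("engineering", PySem.Str.isIn "engineer" nl),
   ("architecture", PySem.Str.isIn "architect" nl),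
   ("leadership", PySem.Str.isIn "lead" nl || PySem.Str.isIn "director" nl),
   ("research", PySem.Str.isIn "research" nl),
   ("content", PySem.Str.isIn "content" nl || PySem.Str.isIn "writer" nl || PySem.Str.isIn "editor" nl),
   ("security", PySem.Str.isIn "security" nl || PySem.Str.isIn "risk" nl),
   ("data", PySem.Str.isIn "data" nl),
   ("ai", (["ai", "ml", "llm"] : List String).any (fun term => PySem.Str.isIn term nl)),
   ("legal", (["legal", "compliance", "regulatory"] : List String).any (fun term => PySem.Str.isIn term nl)),
   ("finance", (["finance", "valuation", "investment"] : List String).any (fun term => PySem.Str.isIn term nl)),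
   ("m&a", (["m&a", "merger", "acquisition", "deal"] : List String).any (fun term => PySem.Str.isIn term nl))]

set_option maxHeartbeats 8000000 in
theorem A_as_fold (name : String) (ds : List String) :
    extract_tags_auto name ds = PySem.List.sorted
      ((PySem.List.slice ds none (some 3)).foldl (fun tags item =>
        let il := PySem.Str.lower item
        let tags := if PySem.Str.isIn "prompt" il then PySem.Set.add tags "prompt-engineering" else tags
        let tags := if PySem.Str.isIn "agent" il then PySem.Set.add tags "agent-architecture" else tags
        if PySem.Str.isIn "pipeline" il then PySem.Set.add tags "pipeline" else tags)
       (condAdds (aNameRules name) PySem.Set.empty)) (fun x => x) false := rfl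

theorem mem_triFold (f g h : String → Bool) (t1 t2 t3 : String)
    (ls : List String) (s : List String) (x : String) :
    x ∈ ls.foldl (fun tags it =>
      let a := if f it then PySem.Set.add tags t1 else tags
      let b := if g it then PySem.Set.add a t2 else a
      if h it then PySem.Set.add b t3 else b) s
    ↔ x ∈ s ∨ (ls.any f = true ∧ t1 = x) ∨ (ls.any g = true ∧ t2 = x) ∨ (ls.any h = true ∧ t3 = x) := by
  induction ls generalizing s with
  | nil => simp
  | cons a l ih =>
    simp only [List.foldl_cons, ih, mem_ite_add, List.any_cons, Bool.or_eq_true]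
    tauto

theorem nodup_triFold (f g h : String → Bool) (t1 t2 t3 : String)
    (ls : List String) (s : List String) (hs : s.Nodup) :
    (ls.foldl (fun tags it =>
      let a := if f it then PySem.Set.add tags t1 else tags
      let b := if g it then PySem.Set.add a t2 else a
      if h it then PySem.Set.add b t3 else b) s).Nodup := by
  induction ls generalizing s with
  | nil => exact hs
  | cons a l ih => exact ih _ (nodup_ite_add _ (nodup_ite_add _ (nodup_ite_add _ hs)))

theorem strLt {a b : String} (h : a.toList < b.toList) : a < b := String.lt_iff_toList_lt.mpr h

theorem pvTags_pairwise : (pvRules.map Prod.fst).Pairwise (fun a b => a < b) := by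
  simp only [pvRules, List.map_cons, List.map_nil, List.pairwise_cons, List.mem_cons,
    List.not_mem_nil, or_false, forall_eq_or_imp, forall_eq, IsEmpty.forall_iff, true_and,
    forall_const]
  repeat' apply And.intro
  all_goals first
    | exact List.Pairwise.nil
    | exact strLt (by decide)

theorem pvTags_nodup : (pvRules.map Prod.fst).Nodup :=
  List.Pairwise.imp (fun h => ne_of_lt h) pvTags_pairwise

theorem filterMap_ite_sublist {α β : Type} (l : List α) (p : α → Bool) (g : α → β) :
    (l.filterMap (fun r => if p r then some (g r) else none)).Sublist (l.map g) := by
  induction l with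
  | nil => simp
  | cons a l ih =>
    simp only [List.filterMap_cons, List.map_cons]
    split_ifs <;> simp [ih]

-- ===== VERDICT (by name: the statement is the Claim_ definition above) =====
set_option maxHeartbeats 8000000 in
theorem extract_tags_auto_spec : Claim_equal_extract_tags_auto := by
  intro name ds _
  unfold Spec_extract_tags_auto
  rw [A_as_fold]
  unfold extract_tags_auto_alt
  apply PySem.List.sorted_eq_of_perm_of_pairwise_lt
  · apply (List.perm_ext_iff_of_nodup ?_ ?_).mpr
    · intro x
      refine Iff.trans ?_ (mem_triFold
        (fun it => PySem.Str.isIn "prompt" (PySem.Str.lower it))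
        (fun it => PySem.Str.isIn "agent" (PySem.Str.lower it))
        (fun it => PySem.Str.isIn "pipeline" (PySem.Str.lower it))
        "prompt-engineering" "agent-architecture" "pipeline"
        (PySem.List.slice ds none (some 3)) (condAdds (aNameRules name) PySem.Set.empty) x).symm
      rw [mem_condAdds]
      simp only [aNameRules, pvRules, List.mem_filterMap, List.mem_cons, List.not_mem_nil,
        or_false, exists_eq_or_imp, exists_eq_left, ite_eq_iff, reduceCtorEq, Option.some.injEq,
        and_false, false_or, List.any_cons, List.any_nil, List.any_map,
        Function.comp_def, Bool.or_false, Bool.or_eq_true, if_true, if_false,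
        Bool.false_eq_true, PySem.Set.empty]
      generalize (PySem.Str.isIn "strategy" (PySem.Str.lower name)) = b1
      generalize (PySem.Str.isIn "strategist" (PySem.Str.lower name)) = b2
      generalize (PySem.Str.isIn "engineer" (PySem.Str.lower name)) = b3
      generalize (PySem.Str.isIn "architect" (PySem.Str.lower name)) = b4
      generalize (PySem.Str.isIn "lead" (PySem.Str.lower name)) = b5
      generalize (PySem.Str.isIn "director" (PySem.Str.lower name)) = b6
      generalize (PySem.Str.isIn "research" (PySem.Str.lower name)) = b7
      generalize (PySem.Str.isIn "content" (PySem.Str.lower name)) = b8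
      generalize (PySem.Str.isIn "writer" (PySem.Str.lower name)) = b9
      generalize (PySem.Str.isIn "editor" (PySem.Str.lower name)) = b10
      generalize (PySem.Str.isIn "security" (PySem.Str.lower name)) = b11
      generalize (PySem.Str.isIn "risk" (PySem.Str.lower name)) = b12
      generalize (PySem.Str.isIn "data" (PySem.Str.lower name)) = b13
      generalize (PySem.Str.isIn "ai" (PySem.Str.lower name)) = b14
      generalize (PySem.Str.isIn "ml" (PySem.Str.lower name)) = b15
      generalize (PySem.Str.isIn "llm" (PySem.Str.lower name)) = b16
      generalize (PySem.Str.isIn "legal" (PySem.Str.lower name)) = b17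
      generalize (PySem.Str.isIn "compliance" (PySem.Str.lower name)) = b18
      generalize (PySem.Str.isIn "regulatory" (PySem.Str.lower name)) = b19
      generalize (PySem.Str.isIn "finance" (PySem.Str.lower name)) = b20
      generalize (PySem.Str.isIn "valuation" (PySem.Str.lower name)) = b21
      generalize (PySem.Str.isIn "investment" (PySem.Str.lower name)) = b22
      generalize (PySem.Str.isIn "m&a" (PySem.Str.lower name)) = b23
      generalize (PySem.Str.isIn "merger" (PySem.Str.lower name)) = b24
      generalize (PySem.Str.isIn "acquisition" (PySem.Str.lower name)) = b25
      generalize (PySem.Str.isIn "deal" (PySem.Str.lower name)) = b26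
      generalize ((PySem.List.slice ds none (some 3)).any fun it => PySem.Str.isIn "prompt" (PySem.Str.lower it)) = p1
      generalize ((PySem.List.slice ds none (some 3)).any fun it => PySem.Str.isIn "agent" (PySem.Str.lower it)) = p2
      generalize ((PySem.List.slice ds none (some 3)).any fun it => PySem.Str.isIn "pipeline" (PySem.Str.lower it)) = p3
      simp only [or_assoc]
      constructor
      all_goals rintro (h|h|h|h|h|h|h|h|h|h|h|h|h|h|h)
      all_goals first
        | exact Or.inl h
        | exact Or.inr (Or.inl h)
        | exact Or.inr (Or.inr (Or.inl h))
        | exact Or.inr (Or.inr (Or.inr (Or.inl h)))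
        | exact Or.inr (Or.inr (Or.inr (Or.inr (Or.inl h))))
        | exact Or.inr (Or.inr (Or.inr (Or.inr (Or.inr (Or.inl h)))))
        | exact Or.inr (Or.inr (Or.inr (Or.inr (Or.inr (Or.inr (Or.inl h))))))
        | exact Or.inr (Or.inr (Or.inr (Or.inr (Or.inr (Or.inr (Or.inr (Or.inl h)))))))
        | exact Or.inr (Or.inr (Or.inr (Or.inr (Or.inr (Or.inr (Or.inr (Or.inr (Or.inl h))))))))
        | exact Or.inr (Or.inr (Or.inr (Or.inr (Or.inr (Or.inr (Or.inr (Or.inr (Or.inr (Or.inl h)))))))))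
        | exact Or.inr (Or.inr (Or.inr (Or.inr (Or.inr (Or.inr (Or.inr (Or.inr (Or.inr (Or.inr (Or.inl h))))))))))
        | exact Or.inr (Or.inr (Or.inr (Or.inr (Or.inr (Or.inr (Or.inr (Or.inr (Or.inr (Or.inr (Or.inr (Or.inl h)))))))))))
        | exact Or.inr (Or.inr (Or.inr (Or.inr (Or.inr (Or.inr (Or.inr (Or.inr (Or.inr (Or.inr (Or.inr (Or.inr (Or.inl h))))))))))))
        | exact Or.inr (Or.inr (Or.inr (Or.inr (Or.inr (Or.inr (Or.inr (Or.inr (Or.inr (Or.inr (Or.inr (Or.inr (Or.inr (Or.inl h)))))))))))))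
        | exact Or.inr (Or.inr (Or.inr (Or.inr (Or.inr (Or.inr (Or.inr (Or.inr (Or.inr (Or.inr (Or.inr (Or.inr (Or.inr (Or.inr (h))))))))))))))
    · exact List.Nodup.sublist (filterMap_ite_sublist pvRules _ Prod.fst) pvTags_nodup
    · exact nodup_triFold
        (fun it => PySem.Str.isIn "prompt" (PySem.Str.lower it))
        (fun it => PySem.Str.isIn "agent" (PySem.Str.lower it))
        (fun it => PySem.Str.isIn "pipeline" (PySem.Str.lower it))
        "prompt-engineering" "agent-architecture" "pipeline"
        (PySem.List.slice ds none (some 3)) _ (nodup_condAdds _ _ List.nodup_nil)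
  · exact List.Pairwise.sublist (filterMap_ite_sublist pvRules _ Prod.fst) pvTags_pairwise
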